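-- pv_equiv track=rewrite | github.com/heltonmaia/proj-question-generator | question_generator/questions_ch5_bk/question_ch5_0115.py | analisar_estatisticas_lista
-- ===== SOURCE A (Python) =====
-- def analisar_estatisticas_lista(numeros: list[int]) -> tuple[int, int, int, int]:
--     """
--     Analisa uma lista de números inteiros e retorna estatísticas sobre eles.
--
--     Args:
--         numeros (list[int]): A lista de números inteiros a ser analisada.
--
--     Returns:
--         tuple[int, int, int, int]: Uma tupla contendo:
--             - A soma dos números pares.
--             - A soma dos números ímpares.
--             - A contagem de números positivos (ignorando o zero).
--             - A contagem de números negativos (ignorando o zero).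
--     """
--     soma_pares = 0
--     soma_impares = 0
--     cont_positivos = 0
--     cont_negativos = 0
--
--     for num in numeros:
--         if num % 2 == 0:
--             soma_pares += num
--         else:
--             soma_impares += num
--
--         if num > 0:
--             cont_positivos += 1
--         elif num < 0:
--             cont_negativos += 1
--         # Números zero são tratados como pares na soma, mas não são contados como positivos nem negativos.
--
--     return soma_pares, soma_impares, cont_positivos, cont_negativos
-- ===== SOURCE B (Python) =====
-- def analisar_estatisticas_lista(numeros):
--     soma_pares = sum(n for n in numeros if n % 2 == 0)
--     soma_impares = sum(n for n in numeros if n % 2 != 0)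
--     cont_positivos = sum(1 for n in numeros if n > 0)
--     cont_negativos = sum(1 for n in numeros if n < 0)
--     return soma_pares, soma_impares, cont_positivos, cont_negativos
-- ===== Notes on version B (the rewrite author's own statement) =====
-- stated objective: idiomatic
-- what changed: Replaced the single fused loop with four shared accumulators by four independent filtered sum-comprehensions, one per statistic.
import Mathlib
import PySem

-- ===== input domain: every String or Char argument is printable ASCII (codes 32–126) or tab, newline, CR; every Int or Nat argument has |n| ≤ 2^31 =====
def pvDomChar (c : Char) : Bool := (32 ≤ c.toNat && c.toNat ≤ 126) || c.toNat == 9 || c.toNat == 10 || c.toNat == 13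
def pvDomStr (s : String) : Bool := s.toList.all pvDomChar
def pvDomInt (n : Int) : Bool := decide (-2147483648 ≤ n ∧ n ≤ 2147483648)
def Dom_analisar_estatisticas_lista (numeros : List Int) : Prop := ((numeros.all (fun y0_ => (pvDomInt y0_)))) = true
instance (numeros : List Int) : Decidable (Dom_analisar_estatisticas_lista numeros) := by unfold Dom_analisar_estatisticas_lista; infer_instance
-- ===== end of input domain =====

-- B replaces A's single fused loop with four independent filtered scans (idiomatic decomposition).
-- ===== PORT A =====
def pvStepA (st : Int × Int × Int × Int) (num : Int) : Int × Int × Int × Int :=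
  let st1 := if PySem.Int.mod num 2 == 0 then (st.1 + num, st.2.1, st.2.2.1, st.2.2.2)
             else (st.1, st.2.1 + num, st.2.2.1, st.2.2.2)
  if num > 0 then (st1.1, st1.2.1, st1.2.2.1 + 1, st1.2.2.2)
  else if num < 0 then (st1.1, st1.2.1, st1.2.2.1, st1.2.2.2 + 1)
  else st1

def analisar_estatisticas_lista (numeros : List Int) : Int × Int × Int × Int :=
  numeros.foldl pvStepA (0, 0, 0, 0)

-- ===== PORT B =====
def analisar_estatisticas_lista_alt (numeros : List Int) : Int × Int × Int × Int :=
  ((numeros.filter (fun n => PySem.Int.mod n 2 == 0)).sum,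
   (numeros.filter (fun n => ¬ (PySem.Int.mod n 2 == 0))).sum,
   ((numeros.filter (fun n => n > 0)).map (fun _ => (1 : Int))).sum,
   ((numeros.filter (fun n => n < 0)).map (fun _ => (1 : Int))).sum)

-- ===== PRECONDITION & SPEC =====
def Spec_analisar_estatisticas_lista (numeros : List Int) (out : Int × Int × Int × Int) : Prop := out = analisar_estatisticas_lista_alt numeros
instance (numeros : List Int) (out : Int × Int × Int × Int) : Decidable (Spec_analisar_estatisticas_lista numeros out) := by unfold Spec_analisar_estatisticas_lista; infer_instance

-- ===== CLAIM (what is proved, stated in full; the proofs are below) =====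
def Claim_equal_analisar_estatisticas_lista : Prop := ∀ (numeros : List Int), Dom_analisar_estatisticas_lista numeros → Spec_analisar_estatisticas_lista numeros (analisar_estatisticas_lista numeros)

-- ===== LEMMAS AND PROOFS =====
theorem pvFoldA (numeros : List Int) (sp si cp cn : Int) :
    numeros.foldl pvStepA (sp, si, cp, cn) =
      (sp + (numeros.filter (fun n => PySem.Int.mod n 2 == 0)).sum,
       si + (numeros.filter (fun n => ¬ (PySem.Int.mod n 2 == 0))).sum,
       cp + ((numeros.filter (fun n => n > 0)).map (fun _ => (1 : Int))).sum,
       cn + ((numeros.filter (fun n => n < 0)).map (fun _ => (1 : Int))).sum) := by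
  induction numeros generalizing sp si cp cn with
  | nil => simp
  | cons x xs ih =>
    simp only [List.foldl_cons, pvStepA, List.filter_cons]
    by_cases hd : (2:Int) ∣ x <;> by_cases hp : x > 0 <;> by_cases hn : x < 0 <;>
      simp [hd, hp, hn, ih] <;> omega

-- ===== VERDICT (by name: the statement is the Claim_ definition above) =====
theorem analisar_estatisticas_lista_spec : Claim_equal_analisar_estatisticas_lista := by
  intro numeros _
  unfold Spec_analisar_estatisticas_lista analisar_estatisticas_lista analisar_estatisticas_lista_alt
  simp [pvFoldA]
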